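-- pv_equiv track=rewrite | github.com/RooTinfinite/leetcode-solutions | solutions/2356-largest-combination-with-bitwise-and-greater-than-zero/largest-combination-with-bitwise-and-greater-than-zero.py | largestCombination
-- ===== SOURCE A (Python) =====
-- from typing import List
--
-- def largestCombination(candidates: List[int]) -> int:
--     max_count = 0
--
--     # Check each bit position from 0 to 31
--     for bit in range(32):
--         current_count = 0
--         # Count numbers that have 1 at current bit position
--         for num in candidates:
--             if num & (1 << bit):
--                 current_count += 1
--         max_count = max(max_count, current_count)
--
--     return max_count
-- ===== SOURCE B (Python) =====
-- def largestCombination(candidates):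
--     # Single pass: strip each number's set bits (within the low 32) high-to-low
--     # into a dict counter keyed by bit position; answer is the largest multiplicity.
--     counts = {}
--     for num in candidates:
--         m = num & 0xFFFFFFFF
--         while m:
--             b = m.bit_length() - 1
--             counts[b] = counts.get(b, 0) + 1
--             m -= 1 << b
--     return max(counts.values(), default=0)
-- ===== Notes on version B (the rewrite author's own statement) =====
-- stated objective: alternative
-- what changed: A scans candidates 32 times (once per bit position), counting and folding into a running max; B makes one pass over candidates, decomposing each number's low-32-bit mask into its set bits by repeated top-bit stripping (bit_length / subtract) into a dict counter keyed only by bits that occur, then takes max of the dict's values with default 0.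
import Mathlib
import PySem

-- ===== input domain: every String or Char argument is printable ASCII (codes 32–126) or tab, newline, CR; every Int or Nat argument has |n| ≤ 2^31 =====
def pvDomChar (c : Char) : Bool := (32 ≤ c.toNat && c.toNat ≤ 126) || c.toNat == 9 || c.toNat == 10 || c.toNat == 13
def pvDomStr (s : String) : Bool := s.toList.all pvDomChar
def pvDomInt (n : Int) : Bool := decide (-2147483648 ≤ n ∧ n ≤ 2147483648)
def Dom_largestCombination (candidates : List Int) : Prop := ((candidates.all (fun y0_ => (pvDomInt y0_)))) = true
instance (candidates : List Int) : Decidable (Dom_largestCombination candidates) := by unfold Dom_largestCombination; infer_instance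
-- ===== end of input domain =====

-- B replaces A's 32 per-bit scans of candidates by ONE pass that strips each number's
-- set bits (of its low-32-bit mask) into a dict counter and takes max(values, default=0).

-- ===== PORT A =====
-- `1 << bit` with bit ∈ range(32) (nonnegative): ported as `(1:Int) <<< bit.toNat`, exact here.
def largestCombination (candidates : List Int) : Int :=
  (PySem.List.pyRange 0 32 1).foldl (fun max_count bit =>
    let current_count := candidates.foldl (fun current_count num =>
      if PySem.Int.band num ((1:Int) <<< bit.toNat) ≠ 0 then current_count + 1
      else current_count) 0
    max max_count current_count) 0

-- ===== PORT B =====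
-- The `while m:` loop of Source B. `m = num & 0xFFFFFFFF` is nonnegative, so m is carried as a
-- Nat (exact). For m ≠ 0, Python's `m.bit_length() - 1` is PySem.Int.bitLength (m:Int) - 1,
-- and `m -= 1 << b` never underflows (2^b ≤ m), so Nat subtraction is exact here.
def pvStrip (counts : PySem.Dict Int Int) (m : Nat) : PySem.Dict Int Int :=
  if m ≠ 0 then
    let b := PySem.Int.bitLength (m : Int) - 1
    pvStrip (counts.insert (b : Int) (counts.getD (b : Int) 0 + 1)) (m - 1 <<< b)
  else counts
termination_by m
decreasing_by
  simp only [Nat.one_shiftLeft]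
  have h1 : 0 < 2 ^ (PySem.Int.bitLength (m : Int) - 1) := by positivity
  omega

def largestCombination_alt (candidates : List Int) : Int :=
  let counts := candidates.foldl
    (fun counts num => pvStrip counts (PySem.Int.band num 4294967295).toNat) PySem.Dict.empty
  PySem.List.maxD counts.values (fun x => x) 0

-- ===== PRECONDITION & SPEC =====
def Spec_largestCombination (candidates : List Int) (out : Int) : Prop := out = largestCombination_alt candidates
instance (candidates : List Int) (out : Int) : Decidable (Spec_largestCombination candidates out) := by unfold Spec_largestCombination; infer_instance

-- ===== CLAIM (what is proved, stated in full; the proofs are below) =====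
def Claim_equal_largestCombination : Prop := ∀ (candidates : List Int), Dom_largestCombination candidates → Spec_largestCombination candidates (largestCombination candidates)

-- ===== LEMMAS AND PROOFS =====

-- A's per-bit count of candidates.
def pvCnt (xs : List Int) (i : Nat) : Int :=
  (xs.countP (fun num => decide (PySem.Int.band num ((1:Int) <<< i) ≠ 0)) : Int)

-- A is the running max over bits 0..31 of pvCnt.
theorem pvA_eq (xs : List Int) :
    largestCombination xs = ((List.range 32).map (fun i => pvCnt xs i)).foldl max 0 := by
  unfold largestCombination
  rw [show (PySem.List.pyRange 0 32 1) = (List.range 32).map (fun k : Nat => (k:Int)) from by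
    rw [PySem.List.pyRange_one]; norm_num; rfl]
  rw [List.foldl_map, List.foldl_map]
  apply PySem.List.foldl_congr_mem
  intro acc k _
  simp only []
  rw [PySem.List.foldl_ite_add_one, zero_add]
  unfold pvCnt
  congr 1
  exact congrArg _ (List.countP_congr (fun a _ => by
    rw [Int.toNat_natCast, Int.shiftLeft_natCast_right]))

-- The (Nat) list of set-bit positions pvStrip visits, high to low.
def pvBits (m : Nat) : List Nat :=
  if m ≠ 0 then
    (PySem.Int.bitLength (m : Int) - 1) :: pvBits (m - 2 ^ (PySem.Int.bitLength (m : Int) - 1))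
  else []
termination_by m
decreasing_by
  have h1 : 0 < 2 ^ (PySem.Int.bitLength (m : Int) - 1) := by positivity
  omega

theorem pvStrip_eq (m : Nat) : ∀ d, pvStrip d m =
    (pvBits m).foldl (fun d b => d.insert (b:Int) (d.getD (b:Int) 0 + 1)) d := by
  induction m using Nat.strong_induction_on with
  | _ m ih =>
    intro d
    rw [pvStrip.eq_def, pvBits.eq_def]
    by_cases h : m ≠ 0
    · rw [if_pos h, if_pos h]
      simp only [List.foldl_cons, Nat.one_shiftLeft]
      refine ih _ ?_ _
      have h1 : 0 < 2 ^ (PySem.Int.bitLength (m : Int) - 1) := by positivity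
      omega
    · simp [h]

-- bounds for the top bit of m ≠ 0
theorem pvTop (m : Nat) (h : m ≠ 0) :
    2 ^ (PySem.Int.bitLength (m : Int) - 1) ≤ m ∧ m < 2 ^ (PySem.Int.bitLength (m : Int) - 1) * 2 := by
  have h1 := PySem.Int.two_pow_bitLength_le (m : Int) (by exact_mod_cast h)
  have h2 := PySem.Int.lt_two_pow_bitLength (m : Int)
  rw [Int.natAbs_natCast] at h1 h2
  constructor
  · exact h1
  · have hbl : PySem.Int.bitLength (m : Int) ≠ 0 := by
      intro h0
      rw [h0] at h2
      simp at h2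
      omega
    calc m < 2 ^ PySem.Int.bitLength (m : Int) := h2
    _ = 2 ^ (PySem.Int.bitLength (m : Int) - 1) * 2 := by
        rw [← pow_succ]; congr 1; omega

-- testBit of 2^t + m' with m' < 2^t
theorem pvTestBit_add (t m' b : Nat) (hm : m' < 2 ^ t) :
    (2 ^ t + m').testBit b = (decide (b = t) || m'.testBit b) := by
  rcases lt_trichotomy b t with hb | hb | hb
  · -- b < t
    rw [Nat.testBit_eq_decide_div_mod_eq, Nat.testBit_eq_decide_div_mod_eq]
    have ht : 2 ^ t = 2 ^ b * 2 ^ (t - b) := by rw [← pow_add]; congr 1; omega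
    rw [ht, Nat.mul_add_div (by positivity)]
    have he : 2 ∣ 2 ^ (t - b) := dvd_pow_self 2 (by omega)
    obtain ⟨c, hc⟩ := he
    simp only [decide_eq_true_eq] at *
    rw [hc]
    simp only [show ¬ (b = t) by omega, decide_false, Bool.false_or, decide_eq_decide]
    omega
  · -- b = t
    subst hb
    rw [Nat.testBit_eq_decide_div_mod_eq]
    have : (2 ^ b + m') / 2 ^ b = 1 := by
      rw [Nat.add_div_left _ (by positivity), Nat.div_eq_of_lt hm]
    rw [this]
    simp [Nat.testBit_lt_two_pow hm]
  · -- t < b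
    have hlt : 2 ^ t + m' < 2 ^ b := by
      calc 2 ^ t + m' < 2 ^ t + 2 ^ t := by omega
      _ = 2 ^ (t + 1) := by ring
      _ ≤ 2 ^ b := Nat.pow_le_pow_right (by norm_num) (by omega)
    rw [Nat.testBit_lt_two_pow hlt, Nat.testBit_lt_two_pow (by omega : m' < 2 ^ b)]
    simp [show ¬ (b = t) by omega]

theorem pvBits_count (m : Nat) : ∀ b, (pvBits m).count b = if m.testBit b then 1 else 0 := by
  induction m using Nat.strong_induction_on with
  | _ m ih =>
    intro b
    rw [pvBits.eq_def]
    by_cases h : m ≠ 0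
    · rw [if_pos h]
      set t := PySem.Int.bitLength (m : Int) - 1 with ht
      obtain ⟨hle, hlt⟩ := pvTop m h
      rw [← ht] at hle hlt
      have hm' : m - 2 ^ t < 2 ^ t := by omega
      have hdec : m - 2 ^ t < m := by
        have h1 : 0 < 2 ^ t := by positivity
        omega
      have hsum : m = 2 ^ t + (m - 2 ^ t) := by omega
      rw [List.count_cons, ih _ hdec b]
      have htb : m.testBit b = (decide (b = t) || (m - 2 ^ t).testBit b) := by
        conv_lhs => rw [hsum]
        exact pvTestBit_add t (m - 2 ^ t) b hm'
      rw [htb]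
      by_cases hbt : b = t
      · subst hbt
        simp [Nat.testBit_lt_two_pow hm']
      · simp only [hbt, decide_false, Bool.false_or, beq_iff_eq,
          if_neg (show ¬ t = b from fun hh => hbt hh.symm), add_zero]
    · push_neg at h
      subst h
      simp

theorem pvBits_lt (m : Nat) (hm : m < 2 ^ 32) : ∀ b ∈ pvBits m, b < 32 := by
  intro b hb
  by_contra hge
  have hc : (pvBits m).count b ≠ 0 := by
    have := List.count_pos_iff.mpr hb
    omega
  rw [pvBits_count m b] at hc
  have : m.testBit b = false :=
    Nat.testBit_lt_two_pow (lt_of_lt_of_le hm (Nat.pow_le_pow_right (by norm_num) (by omega)))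
  simp [this] at hc

-- complement within n bits
theorem pvCompl (n x b : Nat) (hx : x < 2 ^ n) (hb : b < n) :
    (2 ^ n - 1 - x).testBit b = ! x.testBit b := by
  have hA : 0 < 2 ^ b := by positivity
  have hdm : x / 2 ^ b * 2 ^ b + x % 2 ^ b = x := Nat.div_add_mod' x (2 ^ b)
  have hr : x % 2 ^ b < 2 ^ b := Nat.mod_lt _ hA
  have hBA : 2 ^ (n - b) * 2 ^ b = 2 ^ n := by rw [← pow_add]; congr 1; omega
  have hq : x / 2 ^ b < 2 ^ (n - b) := by
    rw [Nat.div_lt_iff_lt_mul hA, hBA]; exact hx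
  have hq1 : x / 2 ^ b * 2 ^ b + 2 ^ b ≤ 2 ^ n := by
    have := Nat.mul_le_mul_right (2 ^ b) (by omega : x / 2 ^ b + 1 ≤ 2 ^ (n - b))
    rw [add_mul, one_mul, hBA] at this
    exact this
  have e1 : 2 ^ b * (2 ^ (n - b) - 1 - x / 2 ^ b) = 2 ^ n - 2 ^ b - x / 2 ^ b * 2 ^ b := by
    rw [Nat.mul_sub, Nat.mul_sub, mul_one, mul_comm (2 ^ b) (2 ^ (n - b)), hBA,
        mul_comm (2 ^ b) (x / 2 ^ b)]
  have key : 2 ^ n - 1 - x = 2 ^ b * (2 ^ (n - b) - 1 - x / 2 ^ b) + (2 ^ b - 1 - x % 2 ^ b) := by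
    rw [e1]
    omega
  rw [Nat.testBit_eq_decide_div_mod_eq, Nat.testBit_eq_decide_div_mod_eq, key,
      Nat.mul_add_div hA,
      Nat.div_eq_of_lt (show 2 ^ b - 1 - x % 2 ^ b < 2 ^ b by omega), Nat.add_zero]
  obtain ⟨c, hc⟩ : 2 ∣ 2 ^ (n - b) := dvd_pow_self 2 (by omega)
  rw [hc] at hq ⊢
  by_cases h2 : x / 2 ^ b % 2 = 1
  · have h3 : ¬ ((2 * c - 1 - x / 2 ^ b) % 2 = 1) := by omega
    simp [h2, h3]
  · have h3 : (2 * c - 1 - x / 2 ^ b) % 2 = 1 := by omega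
    simp [h2, h3]

-- the masked value: bounds and bit test
theorem pvMask_lt (num : Int) :
    0 ≤ PySem.Int.band num 4294967295 ∧ (PySem.Int.band num 4294967295).toNat < 2 ^ 32 := by
  unfold PySem.Int.band
  by_cases h : (0:Int) ≤ num
  · simp only [h, if_true, show (0:Int) ≤ 4294967295 by norm_num, if_true]
    refine ⟨Int.natCast_nonneg _, ?_⟩
    rw [Int.toNat_natCast]
    calc num.toNat &&& (4294967295:Int).toNat ≤ (4294967295:Int).toNat := Nat.and_le_right
    _ < 2 ^ 32 := by norm_num
  · simp only [h, if_false, show (0:Int) ≤ 4294967295 by norm_num, if_true]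
    refine ⟨Int.natCast_nonneg _, ?_⟩
    rw [Int.toNat_natCast]
    calc (4294967295:Int).toNat - _ ≤ (4294967295:Int).toNat := Nat.sub_le _ _
    _ < 2 ^ 32 := by norm_num

theorem pvMask_testBit (num : Int) (b : Nat) (hb : b < 32) :
    (PySem.Int.band num 4294967295).toNat.testBit b =
      decide (PySem.Int.band num ((1:Int) <<< b) ≠ 0) := by
  have hsh : (1:Int) <<< b = ((2 ^ b : Nat) : Int) := by simp [Int.shiftLeft_eq]
  unfold PySem.Int.band
  by_cases h : (0:Int) ≤ num
  · simp only [h, if_true, show (0:Int) ≤ 4294967295 by norm_num, if_true, hsh,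
      show (0:Int) ≤ ((2 ^ b : Nat) : Int) from Int.natCast_nonneg _, Int.toNat_natCast]
    rw [show ((4294967295:Int)).toNat = 2 ^ 32 - 1 from by decide,
        Nat.testBit_land, Nat.testBit_two_pow_sub_one, Nat.and_two_pow]
    cases hbit : num.toNat.testBit b
    · simp [hb, hbit]
    · have h2 : ((2:Nat) ^ b : Int) ≠ 0 := by positivity
      simp [hb, hbit, h2]
  · simp only [h, if_false, show (0:Int) ≤ 4294967295 by norm_num, if_true, hsh,
      show (0:Int) ≤ ((2 ^ b : Nat) : Int) from Int.natCast_nonneg _, Int.toNat_natCast]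
    set k := (-num - 1).toNat with hk
    rw [show ((4294967295:Int)).toNat = 2 ^ 32 - 1 from by decide]
    rw [show (2 ^ 32 - 1) &&& k = k % 2 ^ 32 from by
          rw [Nat.land_comm]; exact Nat.and_two_pow_sub_one_eq_mod k 32]
    have hxlt : k % 2 ^ 32 < 2 ^ 32 := Nat.mod_lt _ (by positivity)
    rw [show 2 ^ 32 - 1 - k % 2 ^ 32 = 2 ^ 32 - 1 - (k % 2 ^ 32) from rfl,
        pvCompl 32 (k % 2 ^ 32) b hxlt hb, Nat.testBit_mod_two_pow, Nat.two_pow_and]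
    cases hbit : k.testBit b
    · have h2 : ((2:Nat) ^ b : Int) ≠ 0 := by positivity
      simp [hb, hbit, h2]
    · simp [hb, hbit]

-- the flat list of (Int-cast) bit positions contributed by one number
def pvL1 (num : Int) : List Int :=
  (pvBits (PySem.Int.band num 4294967295).toNat).map (fun b => (b : Nat))

def pvL (xs : List Int) : List Int := xs.flatMap pvL1

theorem pvFold_flatMap (xs : List Int) :
    ∀ d, xs.foldl (fun d num => pvStrip d (PySem.Int.band num 4294967295).toNat) d =
      (pvL xs).foldl (fun d b => d.insert b (d.getD b 0 + 1)) d := by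
  induction xs with
  | nil => intro d; simp [pvL]
  | cons num rest ih =>
    intro d
    rw [List.foldl_cons, ih]
    have h1 : pvStrip d (PySem.Int.band num 4294967295).toNat
        = (pvL1 num).foldl (fun d b => d.insert b (d.getD b 0 + 1)) d := by
      simp only [pvL1, List.foldl_map]
      exact pvStrip_eq _ _
    rw [h1, pvL, pvL, List.flatMap_cons, List.foldl_append]

theorem pvCount1 (num : Int) (b : Nat) (hb : b < 32) :
    (pvL1 num).count (b : Int) = if PySem.Int.band num ((1:Int) <<< b) ≠ 0 then 1 else 0 := by
  rw [pvL1, List.count_map_of_injective _ _ (fun a a' h => by omega) b, pvBits_count,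
      pvMask_testBit num b hb]
  by_cases hP : PySem.Int.band num ((1:Int) <<< b) ≠ 0 <;> simp [hP]

theorem pvCountL (xs : List Int) (b : Nat) (hb : b < 32) :
    (((pvL xs).count (b : Int) : Nat) : Int) = pvCnt xs b := by
  induction xs with
  | nil => simp [pvL, pvCnt]
  | cons num rest ih =>
    simp only [pvCnt] at ih ⊢
    rw [List.countP_cons]
    rw [show pvL (num :: rest) = pvL1 num ++ pvL rest from by rw [pvL, pvL, List.flatMap_cons],
        List.count_append, pvCount1 num b hb]
    by_cases hP : PySem.Int.band num ((1:Int) <<< b) ≠ 0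
    · rw [if_pos hP, if_pos (show decide (PySem.Int.band num ((1:Int) <<< b) ≠ 0) = true by
        simp only [decide_eq_true_eq]; exact hP)]
      push_cast at ih ⊢
      omega
    · rw [if_neg hP, if_neg (show ¬ decide (PySem.Int.band num ((1:Int) <<< b) ≠ 0) = true by
        simp only [decide_eq_true_eq]; exact hP)]
      push_cast at ih ⊢
      omega

theorem pvMemL (xs : List Int) (k : Int) (hk : k ∈ pvL xs) : ∃ b : Nat, b < 32 ∧ k = (b : Int) := by
  rw [pvL, List.mem_flatMap] at hk
  obtain ⟨num, _, hmem⟩ := hk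
  rw [pvL1, List.mem_map] at hmem
  obtain ⟨b, hb, rfl⟩ := hmem
  exact ⟨b, pvBits_lt _ (pvMask_lt num).2 b hb, rfl⟩

-- max over 0..31 of pvCnt: the value A computes
def pvM (xs : List Int) : Int := ((List.range 32).map (fun i => pvCnt xs i)).foldl max 0

theorem pvCnt_le_pvM (xs : List Int) (b : Nat) (hb : b < 32) : pvCnt xs b ≤ pvM xs :=
  (PySem.List.le_foldl_max _ _).2 _ (List.mem_map.mpr ⟨b, List.mem_range.mpr hb, rfl⟩)

theorem pvCnt_pos_mem (xs : List Int) (b : Nat) (hb : b < 32) (hpos : pvCnt xs b ≠ 0) :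
    (b : Int) ∈ pvL xs := by
  rw [← pvCountL xs b hb] at hpos
  have : (pvL xs).count (b : Int) ≠ 0 := by exact_mod_cast hpos
  exact List.count_pos_iff.mp (by omega)

theorem pvB_eq_pvM (xs : List Int) : largestCombination_alt xs = pvM xs := by
  unfold largestCombination_alt
  rw [pvFold_flatMap]
  set L : List Int := pvL xs with hL
  set D : PySem.Dict Int Int :=
    L.foldl (fun d b => d.insert b (d.getD b 0 + 1)) PySem.Dict.empty with hD
  have hnodup : D.keys.Nodup :=
    PySem.Dict.nodup_keys_foldl_insert L _ _ PySem.Dict.nodup_keys_empty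
  have hkeys : D.keys = PySem.Set.ofList L := by
    rw [hD, PySem.Dict.keys_foldl_insert, PySem.Dict.keys_empty, PySem.Set.update_nil_left]
  have hgetD : ∀ k : Int, D.getD k 0 = (L.count k : Int) := by
    intro k
    rw [hD, PySem.Dict.getD_foldl_insert_add_one, PySem.Dict.getD_empty, zero_add]
  have hvals : D.values = D.keys.map (fun k => (L.count k : Int)) := by
    rw [PySem.Dict.values_eq_map_keys D hnodup 0]
    exact List.map_congr_left (fun k _ => hgetD k)
  have hval_cnt : ∀ v ∈ D.values, ∃ b : Nat, b < 32 ∧ v = pvCnt xs b := by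
    intro v hv
    rw [hvals, List.mem_map] at hv
    obtain ⟨k, hk, rfl⟩ := hv
    rw [hkeys] at hk
    have hkL : k ∈ L := (PySem.Set.mem_ofList L k).mp hk
    obtain ⟨b, hb, rfl⟩ := pvMemL xs k hkL
    exact ⟨b, hb, pvCountL xs b hb⟩
  unfold PySem.List.maxD
  show (PySem.List.max? D.values (fun x => x)).getD 0 = pvM xs
  cases hmax : PySem.List.max? D.values (fun x => x) with
  | none =>
    have hvnil : D.values = [] := (PySem.List.max?_eq_none_iff _ _).mp hmax
    have hknil : D.keys = [] := by
      rw [hvals] at hvnil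
      exact List.map_eq_nil_iff.mp hvnil
    have hall : ∀ b : Nat, b < 32 → pvCnt xs b = 0 := by
      intro b hb
      by_contra hne
      have hmem : (b : Int) ∈ L := pvCnt_pos_mem xs b hb hne
      have hkm : (b : Int) ∈ D.keys := by
        rw [hkeys]
        exact (PySem.Set.mem_ofList L _).mpr hmem
      rw [hknil] at hkm
      exact absurd hkm (List.not_mem_nil)
    rw [Option.getD_none]
    symm
    unfold pvM
    rcases PySem.List.foldl_max_mem ((List.range 32).map (fun i => pvCnt xs i)) 0 with h | h
    · exact h
    · rw [List.mem_map] at h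
      obtain ⟨b, hb, hbv⟩ := h
      rw [← hbv]
      exact hall b (List.mem_range.mp hb)
  | some v =>
    rw [Option.getD_some]
    have hmem := PySem.List.max?_mem hmax
    have hisMax := PySem.List.max?_isMax hmax
    have hv0 : 0 ≤ v := by
      obtain ⟨b, hb, rfl⟩ := hval_cnt v hmem
      exact Int.natCast_nonneg _
    apply le_antisymm
    · obtain ⟨b, hb, rfl⟩ := hval_cnt v hmem
      exact pvCnt_le_pvM xs b hb
    · unfold pvM
      rcases PySem.List.foldl_max_mem ((List.range 32).map (fun i => pvCnt xs i)) 0 with h | h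
      · rw [h]; exact hv0
      · rw [List.mem_map] at h
        obtain ⟨b, hb, hbv⟩ := h
        have hb32 := List.mem_range.mp hb
        rw [← hbv]
        by_cases hz : pvCnt xs b = 0
        · rw [hz]; exact hv0
        · have hmemL : (b : Int) ∈ L := pvCnt_pos_mem xs b hb32 hz
          have hkmem : (b : Int) ∈ D.keys := by
            rw [hkeys]
            exact (PySem.Set.mem_ofList L _).mpr hmemL
          have hvmem : ((L.count ((b : Nat) : Int) : Nat) : Int) ∈ D.values := by
            rw [hvals]
            exact List.mem_map.mpr ⟨(b : Int), hkmem, rfl⟩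
          have hle := hisMax _ hvmem
          rw [← pvCountL xs b hb32]
          simpa using hle

-- ===== VERDICT (by name: the statement is the Claim_ definition above) =====
theorem largestCombination_spec : Claim_equal_largestCombination := by
  intro candidates _
  unfold Spec_largestCombination
  rw [pvA_eq, pvB_eq_pvM]
  rfl
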